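-- pv_equiv track=rewrite | github.com/nasirudeensaddam-ux/room-scheduler | booking_logic.py | _merged_minutes_in_window
-- ===== SOURCE A (Python) =====
-- from typing import Any
--
-- def parse_time_to_minutes(time_value: str | None) -> int | None:
--     if not time_value or not isinstance(time_value, str):
--         return None
--     parts = time_value.strip().split(":")
--     if len(parts) < 2:
--         return None
--     try:
--         hours = int(parts[0])
--         minutes = int(parts[1])
--     except ValueError:
--         return None
--     return hours * 60 + minutes
--
-- def _merged_intervals_in_window(
--     bookings: list[dict[str, Any]],
--     date_iso: str,
--     win_lo: int,
--     win_hi: int,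
-- ) -> list[tuple[int, int]]:
--     """Booked intervals clipped to [win_lo, win_hi), merged."""
--     raw: list[tuple[int, int]] = []
--     for b in bookings:
--         if str(b.get("dateIso") or "") != date_iso:
--             continue
--         s = parse_time_to_minutes(str(b.get("startTime") or ""))
--         e = parse_time_to_minutes(str(b.get("endTime") or ""))
--         if s is None or e is None or e <= s:
--             continue
--         lo = max(s, win_lo)
--         hi = min(e, win_hi)
--         if hi > lo:
--             raw.append((lo, hi))
--     if not raw:
--         return []
--     raw.sort()
--     merged: list[tuple[int, int]] = []
--     cur_lo, cur_hi = raw[0]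
--     for lo, hi in raw[1:]:
--         if lo < cur_hi:
--             cur_hi = max(cur_hi, hi)
--         else:
--             merged.append((cur_lo, cur_hi))
--             cur_lo, cur_hi = lo, hi
--     merged.append((cur_lo, cur_hi))
--     return merged
--
-- def _merged_minutes_in_window(
--     bookings: list[dict[str, Any]],
--     date_iso: str,
--     win_lo: int,
--     win_hi: int,
-- ) -> int:
--     merged = _merged_intervals_in_window(bookings, date_iso, win_lo, win_hi)
--     return sum(hi - lo for lo, hi in merged)
-- ===== SOURCE B (Python) =====
-- def parse_time_to_minutes(time_value):
--     if not time_value or not isinstance(time_value, str):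
--         return None
--     parts = time_value.strip().split(":")
--     if len(parts) < 2:
--         return None
--     try:
--         hours = int(parts[0])
--         minutes = int(parts[1])
--     except ValueError:
--         return None
--     return hours * 60 + minutes
--
-- def _clip(b, date_iso, win_lo, win_hi):
--     """The clipped booked interval of one booking inside [win_lo, win_hi), or None."""
--     if str(b.get("dateIso") or "") != date_iso:
--         return None
--     s = parse_time_to_minutes(str(b.get("startTime") or ""))
--     e = parse_time_to_minutes(str(b.get("endTime") or ""))
--     if s is None or e is None or e <= s:
--         return None
--     lo = max(s, win_lo)
--     hi = min(e, win_hi)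
--     return (lo, hi) if lo < hi else None
--
-- def _merged_minutes_in_window(bookings, date_iso, win_lo, win_hi):
--     # Coordinate compression: between two adjacent interval endpoints, coverage is
--     # constant, so the union length is the sum of the cell widths whose left edge
--     # is covered by some interval.  No sorting of intervals, no merge state machine.
--     ivs = [iv for b in bookings if (iv := _clip(b, date_iso, win_lo, win_hi)) is not None]
--     coords = sorted({x for iv in ivs for x in iv})
--     return sum(b - a
--                for a, b in zip(coords, coords[1:])
--                if any(lo <= a < hi for lo, hi in ivs))
-- ===== Notes on version B (the rewrite author's own statement) =====
-- stated objective: alternative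
-- what changed: Replaces sort-intervals-then-merge-then-sum by coordinate compression: collect the distinct clipped endpoints, and sum the widths of adjacent endpoint cells whose left edge is covered by any interval (coverage is constant inside a cell); no interval sorting, no merge state machine.
import Mathlib
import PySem

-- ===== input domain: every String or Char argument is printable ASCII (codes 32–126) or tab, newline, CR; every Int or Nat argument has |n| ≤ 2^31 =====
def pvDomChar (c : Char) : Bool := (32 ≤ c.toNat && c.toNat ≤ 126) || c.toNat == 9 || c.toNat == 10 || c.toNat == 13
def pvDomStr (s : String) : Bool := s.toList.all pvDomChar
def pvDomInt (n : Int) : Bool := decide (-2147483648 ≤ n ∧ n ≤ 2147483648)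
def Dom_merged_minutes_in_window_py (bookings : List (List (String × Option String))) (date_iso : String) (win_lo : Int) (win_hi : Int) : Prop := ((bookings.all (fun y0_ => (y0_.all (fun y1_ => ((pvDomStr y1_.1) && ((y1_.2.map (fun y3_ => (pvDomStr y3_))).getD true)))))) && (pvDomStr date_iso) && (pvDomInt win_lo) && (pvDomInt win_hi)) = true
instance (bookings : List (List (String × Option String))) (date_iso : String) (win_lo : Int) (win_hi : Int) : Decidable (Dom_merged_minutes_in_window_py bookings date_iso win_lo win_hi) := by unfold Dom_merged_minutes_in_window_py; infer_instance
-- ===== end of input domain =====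

-- B replaces A's sort-intervals/merge/sum pipeline by coordinate compression: sum the widths of
-- adjacent distinct-endpoint cells whose left edge is covered by some clipped interval (alternative
-- algorithm, same result; no interval sorting, no merge state machine).

-- ===== PORT A =====
-- shared module helper: parse_time_to_minutes (both Pythons call this same module-level helper)
def pvParseTime (t : String) : Option Int :=
  if t = "" then none
  else
    match PySem.Str.split? (PySem.Str.strip t) ":" with  -- sep ":" ≠ "" so split? is always some
    | some (p0 :: p1 :: _) =>
      match PySem.Int.ofStr? p0, PySem.Int.ofStr? p1 with
      | some hours, some minutes => some (hours * 60 + minutes)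
      | _, _ => none
    | _ => none  -- len(parts) < 2 (or the unreachable none)

-- shared idiom: str(b.get(k) or "")
def pvGetStr (b : List (String × Option String)) (k : String) : String :=
  match (PySem.Dict.mk b).get? k with
  | some (some s) => s
  | _ => ""

def merged_minutes_in_window_py (bookings : List (List (String × Option String))) (date_iso : String) (win_lo : Int) (win_hi : Int) : Int :=
  -- _merged_intervals_in_window: build raw
  let raw : List (Int × Int) := bookings.foldl (fun raw b =>
    if pvGetStr b "dateIso" ≠ date_iso then raw
    else
      match pvParseTime (pvGetStr b "startTime"), pvParseTime (pvGetStr b "endTime") with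
      | some s, some e =>
        if e ≤ s then raw
        else
          let lo := max s win_lo
          let hi := min e win_hi
          if hi > lo then raw ++ [(lo, hi)] else raw
      | _, _ => raw) []
  -- `if not raw: return []` together with raw.sort(): raw = [] iff sorted(raw) = []
  match PySem.List.sorted2 raw (fun p => p.1) (fun p => p.2) false with
  | [] => 0
  | (cl, ch) :: rest =>
    let st := rest.foldl (fun (s : Int × Int × List (Int × Int)) (p : Int × Int) =>
        if p.1 < s.2.1 then (s.1, max s.2.1 p.2, s.2.2)
        else (p.1, p.2, s.2.2 ++ [(s.1, s.2.1)])) (cl, ch, ([] : List (Int × Int)))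
    (((st.2.2 ++ [(st.1, st.2.1)])).map (fun p => p.2 - p.1)).sum

-- ===== PORT B =====
-- _clip: the clipped booked interval of one booking, or none
def pvClip (b : List (String × Option String)) (date_iso : String) (win_lo : Int) (win_hi : Int) : Option (Int × Int) :=
  if pvGetStr b "dateIso" ≠ date_iso then none
  else
    match pvParseTime (pvGetStr b "startTime"), pvParseTime (pvGetStr b "endTime") with
    | some s, some e =>
      if e ≤ s then none
      else
        let lo := max s win_lo
        let hi := min e win_hi
        if lo < hi then some (lo, hi) else none
    | _, _ => none

def merged_minutes_in_window_py_alt (bookings : List (List (String × Option String))) (date_iso : String) (win_lo : Int) (win_hi : Int) : Int :=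
  let ivs : List (Int × Int) := bookings.filterMap (fun b => pvClip b date_iso win_lo win_hi)
  -- coords = sorted({x for iv in ivs for x in iv})
  let coords : List Int := PySem.List.sorted (PySem.Set.ofList (ivs.flatMap (fun p => [p.1, p.2]))) (fun x => x) false
  -- sum(b - a for a, b in zip(coords, coords[1:]) if any(lo <= a < hi for lo, hi in ivs))
  (((coords.zip (PySem.List.slice coords (some 1) none)).filter
      (fun ab => ivs.any (fun p => decide (p.1 ≤ ab.1) && decide (ab.1 < p.2)))).map
    (fun ab => ab.2 - ab.1)).sum

-- ===== PRECONDITION & SPEC =====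
def Spec_merged_minutes_in_window_py (bookings : List (List (String × Option String))) (date_iso : String) (win_lo : Int) (win_hi : Int) (out : Int) : Prop := out = merged_minutes_in_window_py_alt bookings date_iso win_lo win_hi
instance (bookings : List (List (String × Option String))) (date_iso : String) (win_lo : Int) (win_hi : Int) (out : Int) : Decidable (Spec_merged_minutes_in_window_py bookings date_iso win_lo win_hi out) := by unfold Spec_merged_minutes_in_window_py; infer_instance

-- ===== CLAIM (what is proved, stated in full; the proofs are below) =====
def Claim_equal_merged_minutes_in_window_py : Prop := ∀ (bookings : List (List (String × Option String))) (date_iso : String) (win_lo : Int) (win_hi : Int), Dom_merged_minutes_in_window_py bookings date_iso win_lo win_hi → Spec_merged_minutes_in_window_py bookings date_iso win_lo win_hi (merged_minutes_in_window_py bookings date_iso win_lo win_hi)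

-- ===== LEMMAS AND PROOFS =====

-- A's raw-building loop is B's filterMap of pvClip
lemma pv_raw_eq_filterMap (bookings : List (List (String × Option String))) (date_iso : String) (win_lo win_hi : Int) (acc : List (Int × Int)) :
    bookings.foldl (fun raw b =>
      if pvGetStr b "dateIso" ≠ date_iso then raw
      else
        match pvParseTime (pvGetStr b "startTime"), pvParseTime (pvGetStr b "endTime") with
        | some s, some e =>
          if e ≤ s then raw
          else
            let lo := max s win_lo
            let hi := min e win_hi
            if hi > lo then raw ++ [(lo, hi)] else raw
        | _, _ => raw) acc
    = acc ++ bookings.filterMap (fun b => pvClip b date_iso win_lo win_hi) := by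
  induction bookings generalizing acc with
  | nil => simp
  | cons b bs ih =>
    simp only [List.foldl_cons, List.filterMap_cons]
    rw [ih]
    unfold pvClip
    split_ifs with h1
    · rfl
    · rcases hs : pvParseTime (pvGetStr b "startTime") with _ | s <;>
      rcases he : pvParseTime (pvGetStr b "endTime") with _ | e <;> simp only
      split_ifs with h2 h3 <;> simp

-- every clipped interval satisfies win_lo ≤ lo < hi ≤ win_hi
lemma pv_clip_bounds (b : List (String × Option String)) (date_iso : String) (win_lo win_hi : Int)
    (p : Int × Int) (h : pvClip b date_iso win_lo win_hi = some p) :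
    win_lo ≤ p.1 ∧ p.1 < p.2 ∧ p.2 ≤ win_hi := by
  unfold pvClip at h
  split_ifs at h
  rcases hs : pvParseTime (pvGetStr b "startTime") with _ | s <;> rw [hs] at h <;>
    rcases he : pvParseTime (pvGetStr b "endTime") with _ | e <;> try (rw [he] at h; cases h)
  rw [he] at h
  simp only at h
  split_ifs at h with h2 h3
  · cases h; refine ⟨?_, ?_, ?_⟩ <;> simp <;> omega

-- the reach-sweep step (proof-internal): if hi > reach: total += hi - max(lo, reach); reach = hi
def pvSweep (s : Int × Int) (p : Int × Int) : Int × Int :=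
  if p.2 > s.1 then (p.2, s.2 + (p.2 - max p.1 s.1)) else s

-- the sweep's total component is a shift-invariant accumulator
lemma pv_sweep_shift (l : List (Int × Int)) (r t : Int) :
    l.foldl pvSweep (r, t) = ((l.foldl pvSweep (r, 0)).1, t + (l.foldl pvSweep (r, 0)).2) := by
  induction l generalizing r t with
  | nil => simp
  | cons p l ih =>
    simp only [List.foldl_cons, pvSweep]
    split_ifs
    · rw [ih, ih p.2 (0 + (p.2 - max p.1 r))]
      simp only [Prod.mk.injEq, true_and]
      omega
    · rw [ih]

-- A's merge loop + final sum equals the reach-sweep, from aligned states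
lemma pv_key (l : List (Int × Int)) (cl ch : Int) (m : List (Int × Int))
    (hl : ∀ p ∈ l, p.1 < p.2) :
    (let st := l.foldl (fun (s : Int × Int × List (Int × Int)) (p : Int × Int) =>
        if p.1 < s.2.1 then (s.1, max s.2.1 p.2, s.2.2)
        else (p.1, p.2, s.2.2 ++ [(s.1, s.2.1)])) (cl, ch, m)
     ((st.2.2 ++ [(st.1, st.2.1)]).map (fun p => p.2 - p.1)).sum)
    = (m.map (fun p => p.2 - p.1)).sum + (ch - cl) + (l.foldl pvSweep (ch, 0)).2 := by
  induction l generalizing cl ch m with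
  | nil => simp
  | cons p l ih =>
    have hp := hl p (by simp)
    have hl' : ∀ q ∈ l, q.1 < q.2 := fun q hq => hl q (by simp [hq])
    simp only [List.foldl_cons, pvSweep]
    by_cases h1 : p.1 < ch
    · simp only [if_pos h1]
      by_cases h2 : p.2 > ch
      · rw [if_pos h2, ih _ _ _ hl', pv_sweep_shift l p.2 (0 + (p.2 - max p.1 ch))]
        simp only [max_def]
        split_ifs <;> omega
      · rw [if_neg h2, ih _ _ _ hl']
        have h3 : max ch p.2 = ch := by omega
        rw [h3]
    · simp only [if_neg h1]
      have h2 : p.2 > ch := by omega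
      rw [if_pos h2, ih _ _ _ hl', pv_sweep_shift l p.2 (0 + (p.2 - max p.1 ch))]
      simp only [List.map_append, List.map_cons, List.map_nil, List.sum_append,
        List.sum_cons, List.sum_nil, max_def]
      split_ifs <;> omega

-- sorted2's lexicographic "before" comparator, and sortedness in the first component
def pvBefore (a b : Int × Int) : Bool :=
  decide (a.1 < b.1) || (!decide (b.1 < a.1) && decide (a.2 < b.2))

lemma pv_sorted2_eq (l : List (Int × Int)) :
    PySem.List.sorted2 l (fun p => p.1) (fun p => p.2) false
      = l.foldl (fun acc x => PySem.List.insertBy pvBefore x acc) [] := rfl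

lemma pv_insert_pw (x : Int × Int) (l : List (Int × Int))
    (h : l.Pairwise (fun p q => p.1 ≤ q.1)) :
    (PySem.List.insertBy pvBefore x l).Pairwise (fun p q : Int × Int => p.1 ≤ q.1) := by
  induction l with
  | nil => simp [PySem.List.insertBy]
  | cons y ys ih =>
    rcases h with _ | ⟨hy, hys⟩
    by_cases hb : pvBefore x y = true
    · rw [PySem.List.insertBy, if_pos hb]
      have hxy : x.1 ≤ y.1 := by
        simp only [pvBefore, Bool.or_eq_true, Bool.and_eq_true, decide_eq_true_eq,
          Bool.not_eq_true', decide_eq_false_iff_not] at hb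
        omega
      refine List.Pairwise.cons ?_ (List.Pairwise.cons hy hys)
      intro z hz
      rcases List.mem_cons.mp hz with rfl | hz
      · exact hxy
      · exact le_trans hxy (hy z hz)
    · rw [PySem.List.insertBy, if_neg hb]
      have hyx : y.1 ≤ x.1 := by
        simp only [pvBefore, Bool.or_eq_true, Bool.and_eq_true, decide_eq_true_eq,
          Bool.not_eq_true', decide_eq_false_iff_not] at hb
        omega
      refine List.Pairwise.cons ?_ (ih hys)
      intro z hz
      rcases (PySem.List.mem_insertBy pvBefore x z ys).mp hz with rfl | hz
      · exact hyx
      · exact hy z hz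

lemma pv_sorted2_pairwise_fst (l : List (Int × Int)) :
    (PySem.List.sorted2 l (fun p => p.1) (fun p => p.2) false).Pairwise
      (fun p q : Int × Int => p.1 ≤ q.1) := by
  rw [pv_sorted2_eq]
  have : ∀ (l acc : List (Int × Int)), acc.Pairwise (fun p q : Int × Int => p.1 ≤ q.1) →
      (l.foldl (fun acc x => PySem.List.insertBy pvBefore x acc) acc).Pairwise
        (fun p q : Int × Int => p.1 ≤ q.1) := by
    intro l
    induction l with
    | nil => intro acc h; exact h
    | cons x xs ih => intro acc h; exact ih _ (pv_insert_pw x acc h)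
  exact this l [] (by simp)

-- coverage predicate: some interval of ivs covers minute t
def pvCov (ivs : List (Int × Int)) (t : Int) : Bool :=
  ivs.any (fun p => decide (p.1 ≤ t) && decide (t < p.2))

lemma pvCov_iff (ivs : List (Int × Int)) (t : Int) :
    pvCov ivs t = true ↔ ∃ p ∈ ivs, p.1 ≤ t ∧ t < p.2 := by
  simp [pvCov]

-- the reach-sweep total counts the covered minutes of [r, win_hi)
lemma pv_reach_card (win_hi : Int) (l : List (Int × Int)) (r : Int)
    (hpw : l.Pairwise (fun p q : Int × Int => p.1 ≤ q.1))
    (hb : ∀ p ∈ l, p.1 < p.2 ∧ p.2 ≤ win_hi) :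
    (l.foldl pvSweep (r, 0)).2
      = (((Finset.Ico r win_hi).filter (fun t => pvCov l t = true)).card : Int) := by
  induction l generalizing r with
  | nil =>
    simp [pvCov]
  | cons p rest ih =>
    rcases hpw with _ | ⟨hhead, hpw'⟩
    have hp := hb p (by simp)
    have hb' : ∀ q ∈ rest, q.1 < q.2 ∧ q.2 ≤ win_hi := fun q hq => hb q (by simp [hq])
    simp only [List.foldl_cons, pvSweep]
    by_cases h2 : p.2 > r
    · rw [if_pos h2, pv_sweep_shift rest p.2 (0 + (p.2 - max p.1 r)), ih p.2 hpw' hb']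
      -- split the covered set at p.2
      have hsplit : (Finset.Ico r win_hi).filter (fun t => pvCov (p :: rest) t = true)
          = Finset.Ico (max p.1 r) p.2
            ∪ (Finset.Ico p.2 win_hi).filter (fun t => pvCov rest t = true) := by
        ext t
        simp only [Finset.mem_filter, Finset.mem_Ico, Finset.mem_union, pvCov_iff]
        constructor
        · rintro ⟨⟨hrt, htw⟩, q, hq, hq1, hq2⟩
          rcases List.mem_cons.mp hq with rfl | hq
          · left; omega
          · by_cases ht : p.2 ≤ t
            · right; exact ⟨⟨ht, htw⟩, q, hq, hq1, hq2⟩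
            · left; have := hhead q hq; omega
        · rintro (⟨h1, h3⟩ | ⟨⟨h1, h3⟩, q, hq, hq1, hq2⟩)
          · exact ⟨⟨by omega, by omega⟩, p, by simp, by omega, by omega⟩
          · exact ⟨⟨by omega, h3⟩, q, by simp [hq], hq1, hq2⟩
      have hdis : Disjoint (Finset.Ico (max p.1 r) p.2)
          ((Finset.Ico p.2 win_hi).filter (fun t => pvCov rest t = true)) := by
        refine Finset.disjoint_left.mpr ?_
        intro t ht ht'
        simp only [Finset.mem_Ico] at ht
        simp only [Finset.mem_filter, Finset.mem_Ico] at ht'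
        omega
      rw [hsplit, Finset.card_union_of_disjoint hdis]
      push_cast
      rw [Int.card_Ico]
      rw [Int.toNat_of_nonneg (by omega)]
      omega
    · rw [if_neg h2, ih r hpw' hb']
      congr 1
      apply congrArg
      apply Finset.filter_congr
      intro t ht
      simp only [Finset.mem_Ico] at ht
      simp only [pvCov_iff]
      constructor
      · rintro ⟨q, hq, hq1, hq2⟩
        exact ⟨q, List.mem_cons_of_mem p hq, hq1, hq2⟩
      · rintro ⟨q, hq, hq1, hq2⟩
        rcases List.mem_cons.mp hq with rfl | hq
        · omega
        · exact ⟨q, hq, hq1, hq2⟩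

-- B's adjacent-cell sum counts the covered minutes of [a, win_hi),
-- when a :: cs is strictly increasing, contains every endpoint > a, and stays ≤ win_hi
lemma pv_coords_card (ivs : List (Int × Int)) (win_hi : Int) (cs : List Int) (a : Int)
    (hpw : (a :: cs).Pairwise (· < ·))
    (hmem : ∀ p ∈ ivs, (a < p.1 → p.1 ∈ cs) ∧ (a < p.2 → p.2 ∈ cs))
    (hle : ∀ c ∈ (a :: cs), c ≤ win_hi) :
    ((((a :: cs).zip cs).filter
        (fun ab : Int × Int => ivs.any (fun p => decide (p.1 ≤ ab.1) && decide (ab.1 < p.2)))).map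
      (fun ab => ab.2 - ab.1)).sum
      = (((Finset.Ico a win_hi).filter (fun t => pvCov ivs t = true)).card : Int) := by
  induction cs generalizing a with
  | nil =>
    simp only [List.zip_nil_right, List.filter_nil, List.map_nil, List.sum_nil]
    have : (Finset.Ico a win_hi).filter (fun t => pvCov ivs t = true) = ∅ := by
      ext t
      simp only [Finset.mem_filter, Finset.mem_Ico, Finset.notMem_empty, iff_false, not_and,
        pvCov_iff]
      rintro ⟨hat, htw⟩ ⟨q, hq, hq1, hq2⟩
      have h := (hmem q hq).2 (by omega)
      simp at h
    rw [this]; simp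
  | cons b rest ih =>
    rcases hpw with _ | ⟨hheadlt, hpw'⟩
    have hab : a < b := hheadlt b (by simp)
    have hbw : b ≤ win_hi := hle b (by simp)
    have hrestgt : ∀ c ∈ rest, b < c := by
      intro c hc
      rcases hpw' with _ | ⟨hb2, _⟩
      exact hb2 c hc
    -- instantiate the IH at b
    have hmem' : ∀ p ∈ ivs, (b < p.1 → p.1 ∈ rest) ∧ (b < p.2 → p.2 ∈ rest) := by
      intro p hp
      refine ⟨fun h => ?_, fun h => ?_⟩
      · rcases List.mem_cons.mp ((hmem p hp).1 (by omega)) with h' | h'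
        · omega
        · exact h'
      · rcases List.mem_cons.mp ((hmem p hp).2 (by omega)) with h' | h'
        · omega
        · exact h'
    have hih := ih b (List.Pairwise.cons (fun c hc => hrestgt c hc) (hpw'.sublist (List.sublist_cons_self b rest))) hmem' (fun c hc => hle c (by simp at hc ⊢; tauto))
    -- the head cell
    simp only [List.zip_cons_cons, List.filter_cons]
    -- a coordinate strictly between a and b is impossible; coverage is constant on [a, b)
    have hcellconst : ∀ t, a ≤ t → t < b → (pvCov ivs t = true ↔ pvCov ivs a = true) := by
      intro t hat htb
      simp only [pvCov_iff]
      constructor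
      · rintro ⟨q, hq, hq1, hq2⟩
        have hq1a : q.1 ≤ a := by
          by_contra hgt
          rcases List.mem_cons.mp ((hmem q hq).1 (by omega)) with h | h
          · omega
          · have := hrestgt q.1 h; omega
        exact ⟨q, hq, hq1a, by omega⟩
      · rintro ⟨q, hq, hq1, hq2⟩
        have hq2b : b ≤ q.2 := by
          rcases List.mem_cons.mp ((hmem q hq).2 (by omega)) with h | h
          · omega
          · have := hrestgt q.2 h; omega
        exact ⟨q, hq, by omega, by omega⟩
    have hIcoSplit : Finset.Ico a win_hi = Finset.Ico a b ∪ Finset.Ico b win_hi :=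
      (Finset.Ico_union_Ico_eq_Ico (by omega) hbw).symm
    have hdis : Disjoint ((Finset.Ico a b).filter (fun t => pvCov ivs t = true))
        ((Finset.Ico b win_hi).filter (fun t => pvCov ivs t = true)) := by
      refine Finset.disjoint_left.mpr ?_
      intro t ht ht'
      simp only [Finset.mem_filter, Finset.mem_Ico] at ht ht'
      omega
    rw [hIcoSplit, Finset.filter_union, Finset.card_union_of_disjoint hdis]
    by_cases hcov : pvCov ivs a = true
    · have hcell : (Finset.Ico a b).filter (fun t => pvCov ivs t = true) = Finset.Ico a b := by
        apply Finset.filter_true_of_mem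
        intro t ht
        simp only [Finset.mem_Ico] at ht
        exact (hcellconst t ht.1 ht.2).mpr hcov
      rw [if_pos (by simpa [pvCov] using hcov)]
      simp only [List.map_cons, List.sum_cons]
      rw [hih, hcell]
      push_cast
      rw [Int.card_Ico, Int.toNat_of_nonneg (by omega)]
    · have hcell : (Finset.Ico a b).filter (fun t => pvCov ivs t = true) = ∅ := by
        ext t
        simp only [Finset.mem_filter, Finset.mem_Ico, Finset.notMem_empty, iff_false, not_and]
        intro ht hcovt
        exact hcov ((hcellconst t ht.1 ht.2).mp hcovt)
      rw [if_neg (by simpa [pvCov] using hcov)]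
      rw [hih, hcell]
      simp

-- coverage only depends on the intervals as a multiset
lemma pv_cov_perm (l l' : List (Int × Int)) (h : l.Perm l') (t : Int) :
    pvCov l t = pvCov l' t := by
  simp only [pvCov]
  exact h.any_eq

-- the whole pipeline, over an abstract clipped-interval list
lemma pv_main (ivs : List (Int × Int)) (win_lo win_hi : Int)
    (hbnd : ∀ p ∈ ivs, win_lo ≤ p.1 ∧ p.1 < p.2 ∧ p.2 ≤ win_hi) :
    (match PySem.List.sorted2 ivs (fun p => p.1) (fun p => p.2) false with
      | [] => (0 : Int)
      | (cl, ch) :: rest =>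
        let st := rest.foldl (fun (s : Int × Int × List (Int × Int)) (p : Int × Int) =>
            if p.1 < s.2.1 then (s.1, max s.2.1 p.2, s.2.2)
            else (p.1, p.2, s.2.2 ++ [(s.1, s.2.1)])) (cl, ch, ([] : List (Int × Int)))
        (((st.2.2 ++ [(st.1, st.2.1)])).map (fun p => p.2 - p.1)).sum)
    = (let coords : List Int := PySem.List.sorted
          (PySem.Set.ofList (ivs.flatMap (fun p => [p.1, p.2]))) (fun x => x) false
       (((coords.zip (PySem.List.slice coords (some 1) none)).filter
          (fun ab => ivs.any (fun p => decide (p.1 ≤ ab.1) && decide (ab.1 < p.2)))).map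
        (fun ab => ab.2 - ab.1)).sum) := by
  have hperm := PySem.List.sorted2_perm ivs (fun p => p.1) (fun p => p.2) false
  have hpw := pv_sorted2_pairwise_fst ivs
  simp only [PySem.List.slice_from_one]
  rcases hsl : PySem.List.sorted2 ivs (fun p => p.1) (fun p => p.2) false with _ | ⟨⟨cl, ch⟩, rest⟩
  · -- no clipped interval at all
    rw [hsl] at hperm
    have hivs0 : ivs = [] := hperm.symm.eq_nil
    subst hivs0
    rfl
  · rw [hsl] at hperm hpw
    have hbnds : ∀ p ∈ (cl, ch) :: rest, win_lo ≤ p.1 ∧ p.1 < p.2 ∧ p.2 ≤ win_hi :=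
      fun p hp => hbnd p (hperm.subset hp)
    have hhead := hbnds (cl, ch) (by simp)
    -- A's merge+sum = reach sweep = covered cardinality
    dsimp only
    have hk := pv_key rest cl ch [] (fun p hp => (hbnds p (List.mem_cons_of_mem _ hp)).2.1)
    dsimp only at hk
    rw [hk]
    have hA : (List.map (fun p : Int × Int => p.2 - p.1) []).sum + (ch - cl)
          + (rest.foldl pvSweep (ch, 0)).2
        = (((cl, ch) :: rest).foldl pvSweep (win_lo, 0)).2 := by
      simp only [List.foldl_cons, pvSweep]
      rw [if_pos (show ch > win_lo by simp at hhead ⊢; omega)]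
      rw [pv_sweep_shift rest ch (0 + (ch - max cl win_lo))]
      have hmax : max cl win_lo = cl := by simp at hhead ⊢; omega
      rw [hmax]
      simp
    rw [hA, pv_reach_card win_hi ((cl, ch) :: rest) win_lo hpw
      (fun p hp => (hbnds p hp).2)]
    have hcovP : ∀ t, pvCov ((cl, ch) :: rest) t = pvCov ivs t := fun t => pv_cov_perm _ _ hperm t
    have hfilt : (Finset.Ico win_lo win_hi).filter (fun t => pvCov ((cl, ch) :: rest) t = true)
        = (Finset.Ico win_lo win_hi).filter (fun t => pvCov ivs t = true) := by
      apply Finset.filter_congr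
      intro t _
      rw [hcovP t]
    rw [hfilt]
    -- B's side: coordinate cells
    have hmemE : ∀ x, x ∈ PySem.List.sorted
        (PySem.Set.ofList (ivs.flatMap (fun p => [p.1, p.2]))) (fun x => x) false
        ↔ ∃ p ∈ ivs, x = p.1 ∨ x = p.2 := by
      intro x
      rw [PySem.List.mem_sorted, PySem.Set.mem_ofList, List.mem_flatMap]
      constructor
      · rintro ⟨p, hp, hx⟩
        simp only [List.mem_cons] at hx
        exact ⟨p, hp, by tauto⟩
      · rintro ⟨p, hp, hx⟩
        exact ⟨p, hp, by simp [hx]⟩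
    rcases hc : PySem.List.sorted
        (PySem.Set.ofList (ivs.flatMap (fun p => [p.1, p.2]))) (fun x => x) false
        with _ | ⟨c, cs⟩
    · -- impossible: ivs is nonempty, so it has an endpoint
      exfalso
      have hin : (cl, ch) ∈ ivs := hperm.subset (by simp)
      have := (hmemE cl).mpr ⟨(cl, ch), hin, Or.inl rfl⟩
      rw [hc] at this
      simp at this
    · rw [hc, List.tail_cons]
      have hpwc : (c :: cs).Pairwise (· < ·) := by
        have := PySem.List.sorted_ofList_pairwise_lt (ivs.flatMap (fun p => [p.1, p.2]))
        rwa [hc] at this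
      have hheadle : ∀ x ∈ c :: cs, c ≤ x := by
        intro x hx
        rcases List.mem_cons.mp hx with rfl | hx
        · exact le_rfl
        · rcases hpwc with _ | ⟨h1, _⟩
          exact le_of_lt (h1 x hx)
      have hmemc : ∀ x, (∃ p ∈ ivs, x = p.1 ∨ x = p.2) → x ∈ c :: cs := by
        intro x hx
        have := (hmemE x).mpr hx
        rwa [hc] at this
      rw [pv_coords_card ivs win_hi cs c hpwc
        (fun p hp => ⟨fun h => by
            rcases List.mem_cons.mp (hmemc p.1 ⟨p, hp, Or.inl rfl⟩) with h' | h'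
            · omega
            · exact h',
          fun h => by
            rcases List.mem_cons.mp (hmemc p.2 ⟨p, hp, Or.inr rfl⟩) with h' | h'
            · omega
            · exact h'⟩)
        (fun x hx => by
          obtain ⟨p, hp, hor⟩ := (hmemE x).mp (by rw [hc]; exact hx)
          have := hbnd p hp
          rcases hor with rfl | rfl <;> omega)]
      -- the two covered sets coincide: every covered minute is ≥ c and ≥ win_lo
      congr 1
      apply congrArg
      apply Finset.ext
      intro t
      simp only [Finset.mem_filter, Finset.mem_Ico]
      constructor
      · rintro ⟨⟨h1, h2⟩, hcov⟩
        refine ⟨⟨?_, h2⟩, hcov⟩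
        obtain ⟨p, hp, hp1, hp2⟩ := (pvCov_iff ivs t).mp hcov
        have hc1 := hheadle p.1 (hmemc p.1 ⟨p, hp, Or.inl rfl⟩)
        omega
      · rintro ⟨⟨h1, h2⟩, hcov⟩
        refine ⟨⟨?_, h2⟩, hcov⟩
        obtain ⟨p, hp, hp1, hp2⟩ := (pvCov_iff ivs t).mp hcov
        have := hbnd p hp
        omega

-- ===== VERDICT (by name: the statement is the Claim_ definition above) =====
theorem merged_minutes_in_window_py_spec : Claim_equal_merged_minutes_in_window_py := by
  intro bookings date_iso win_lo win_hi _
  unfold Spec_merged_minutes_in_window_py merged_minutes_in_window_py merged_minutes_in_window_py_alt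
  rw [pv_raw_eq_filterMap bookings date_iso win_lo win_hi []]
  simp only [List.nil_append]
  set ivs := bookings.filterMap (fun b => pvClip b date_iso win_lo win_hi) with hivs
  have hbnd : ∀ p ∈ ivs, win_lo ≤ p.1 ∧ p.1 < p.2 ∧ p.2 ≤ win_hi := by
    intro p hp
    obtain ⟨b, _, hb⟩ := List.mem_filterMap.mp hp
    exact pv_clip_bounds _ _ _ _ _ hb
  exact pv_main ivs win_lo win_hi hbnd
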